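-- pv_equiv track=rewrite | github.com/pypi-data/pypi-mirror-353 | packages/failextract/failextract-1.0.0-py3-none-any.whl/failextract/failextract.py | _assess_criticality
-- ===== SOURCE A (Python) =====
-- from typing import Any, Callable, Dict, List, Optional, Set, Union, Tuple, NamedTuple
--
-- def _assess_criticality(failure: Dict[str, Any]) -> str:
--     """Assess the criticality level of a failure."""
--     error_message = failure.get('error_message', '').lower()
--     filename = failure.get('filename', '').lower()
--
--     # Critical: Core system failures
--     if any(pattern in error_message for pattern in ['modulenotfounderror', 'importerror', 'syntaxerror']):
--         return 'critical'
--
--     # Critical: Core/infrastructure files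
--     if any(pattern in filename for pattern in ['__init__', 'setup', 'config', 'core']):
--         return 'critical'
--
--     # High: Security or data integrity issues
--     if any(pattern in error_message for pattern in ['permission', 'access', 'security', 'integrity']):
--         return 'high'
--
--     # High: Performance-critical failures
--     if any(pattern in error_message for pattern in ['timeout', 'memory', 'performance']):
--         return 'high'
--
--     # Medium: Logic errors
--     if any(pattern in error_message for pattern in ['assertionerror', 'valueerror', 'typeerror']):
--         return 'medium'
--
--     # Low: Everything else
--     return 'low'
-- ===== SOURCE B (Python) =====
-- # Flat severity map: every pattern is keyed to the field it is searched in and a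
-- # numeric severity rank; B collects ALL matching ranks and returns the best one
-- # (no first-match cascade / early returns).
-- _SEVERITY = {
--     'modulenotfounderror': ('error_message', 0),
--     'importerror': ('error_message', 0),
--     'syntaxerror': ('error_message', 0),
--     '__init__': ('filename', 1),
--     'setup': ('filename', 1),
--     'config': ('filename', 1),
--     'core': ('filename', 1),
--     'permission': ('error_message', 2),
--     'access': ('error_message', 2),
--     'security': ('error_message', 2),
--     'integrity': ('error_message', 2),
--     'timeout': ('error_message', 3),
--     'memory': ('error_message', 3),
--     'performance': ('error_message', 3),
--     'assertionerror': ('error_message', 4),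
--     'valueerror': ('error_message', 4),
--     'typeerror': ('error_message', 4),
-- }
-- _LABELS = ['critical', 'critical', 'high', 'high', 'medium']
--
-- def _assess_criticality(failure):
--     """Assess the criticality level of a failure."""
--     fields = {
--         'error_message': failure.get('error_message', '').lower(),
--         'filename': failure.get('filename', '').lower(),
--     }
--     ranks = [rank for pat, (field, rank) in _SEVERITY.items() if pat in fields[field]]
--     return _LABELS[min(ranks)] if ranks else 'low'
-- ===== Notes on version B (the rewrite author's own statement) =====
-- stated objective: alternative
-- what changed: Replaces A's ordered first-match if-cascade with a flat pattern->(field,rank) severity map: B collects the ranks of ALL matching patterns in one comprehension and returns the label of the minimum (most severe) rank, with no early returns.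
import Mathlib
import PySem

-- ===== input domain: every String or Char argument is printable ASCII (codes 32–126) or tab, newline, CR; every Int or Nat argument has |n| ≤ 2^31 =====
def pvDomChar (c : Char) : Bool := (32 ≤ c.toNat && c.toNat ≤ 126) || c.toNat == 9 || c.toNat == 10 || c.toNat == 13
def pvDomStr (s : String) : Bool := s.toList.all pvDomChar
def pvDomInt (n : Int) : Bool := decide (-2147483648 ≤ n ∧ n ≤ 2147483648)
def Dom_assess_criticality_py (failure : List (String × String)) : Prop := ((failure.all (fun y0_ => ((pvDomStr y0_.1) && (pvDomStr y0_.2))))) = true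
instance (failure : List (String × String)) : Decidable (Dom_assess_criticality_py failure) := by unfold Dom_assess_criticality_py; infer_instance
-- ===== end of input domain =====

-- B replaces A's first-match cascade by a flat pattern→(field,rank) severity map: it collects ALL matching ranks and returns the label of the best one (objective: alternative).


-- ===== PORT A =====
-- dict.get(k, '') on the association list: first match, '' default
def pvGetD (d : List (String × String)) (k : String) : String :=
  match d.find? (fun p => p.1 == k) with
  | some p => p.2
  | none => ""

def assess_criticality_py (failure : List (String × String)) : String :=
  let error_message := PySem.Str.lower (pvGetD failure "error_message")
  let filename := PySem.Str.lower (pvGetD failure "filename")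
  if (["modulenotfounderror", "importerror", "syntaxerror"].any
      (fun pattern => PySem.Str.isIn pattern error_message)) then "critical"
  else if (["__init__", "setup", "config", "core"].any
      (fun pattern => PySem.Str.isIn pattern filename)) then "critical"
  else if (["permission", "access", "security", "integrity"].any
      (fun pattern => PySem.Str.isIn pattern error_message)) then "high"
  else if (["timeout", "memory", "performance"].any
      (fun pattern => PySem.Str.isIn pattern error_message)) then "high"
  else if (["assertionerror", "valueerror", "typeerror"].any
      (fun pattern => PySem.Str.isIn pattern error_message)) then "medium"
  else "low"

-- ===== PORT B =====
-- _SEVERITY: pattern ↦ (field, rank), in insertion order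
def pvSeverity : List (String × String × Int) :=
  [ ("modulenotfounderror", "error_message", 0),
    ("importerror", "error_message", 0),
    ("syntaxerror", "error_message", 0),
    ("__init__", "filename", 1),
    ("setup", "filename", 1),
    ("config", "filename", 1),
    ("core", "filename", 1),
    ("permission", "error_message", 2),
    ("access", "error_message", 2),
    ("security", "error_message", 2),
    ("integrity", "error_message", 2),
    ("timeout", "error_message", 3),
    ("memory", "error_message", 3),
    ("performance", "error_message", 3),
    ("assertionerror", "error_message", 4),
    ("valueerror", "error_message", 4),
    ("typeerror", "error_message", 4) ]

def pvLabels : List String := ["critical", "critical", "high", "high", "medium"]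

def assess_criticality_py_alt (failure : List (String × String)) : String :=
  let fields : PySem.Dict String String :=
    (PySem.Dict.empty.insert "error_message" (PySem.Str.lower (pvGetD failure "error_message"))).insert
      "filename" (PySem.Str.lower (pvGetD failure "filename"))
  let ranks := pvSeverity.filterMap
    (fun e => if PySem.Str.isIn e.1 (fields.getD e.2.1 "") then some e.2.2 else none)
  match PySem.List.min? ranks (fun x => x) with
  | some m => PySem.List.pyGetD pvLabels m ""
  | none => "low"

-- ===== PRECONDITION & SPEC =====
def Spec_assess_criticality_py (failure : List (String × String)) (out : String) : Prop := out = assess_criticality_py_alt failure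
instance (failure : List (String × String)) (out : String) : Decidable (Spec_assess_criticality_py failure out) := by unfold Spec_assess_criticality_py; infer_instance

-- ===== CLAIM (what is proved, stated in full; the proofs are below) =====
def Claim_equal_assess_criticality_py : Prop := ∀ (failure : List (String × String)), Dom_assess_criticality_py failure → Spec_assess_criticality_py failure (assess_criticality_py failure)

-- ===== LEMMAS AND PROOFS =====
theorem pv_min_eq {xs : List Int} {m : Int} (h1 : m ∈ xs) (h2 : ∀ y ∈ xs, m ≤ y) :
    PySem.List.min? xs (fun x => x) = some m := by
  cases h : PySem.List.min? xs (fun x => x) with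
  | none => rw [PySem.List.min?_eq_none_iff] at h; subst h; cases h1
  | some k =>
    have hk := PySem.List.min?_mem h
    have hle := PySem.List.min?_isMin h m h1
    have h2k := h2 k hk
    simp only at hle
    exact congrArg some (le_antisymm h2k hle).symm


theorem pv_core (em fn : String) :
    (if (["modulenotfounderror", "importerror", "syntaxerror"].any
        (fun pattern => PySem.Str.isIn pattern em)) then "critical"
    else if (["__init__", "setup", "config", "core"].any
        (fun pattern => PySem.Str.isIn pattern fn)) then "critical"
    else if (["permission", "access", "security", "integrity"].any
        (fun pattern => PySem.Str.isIn pattern em)) then "high"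
    else if (["timeout", "memory", "performance"].any
        (fun pattern => PySem.Str.isIn pattern em)) then "high"
    else if (["assertionerror", "valueerror", "typeerror"].any
        (fun pattern => PySem.Str.isIn pattern em)) then "medium"
    else "low")
    =
    (match PySem.List.min? (pvSeverity.filterMap
        (fun e => if PySem.Str.isIn e.1 ((((PySem.Dict.empty.insert "error_message" em).insert "filename" fn).getD e.2.1 "")) then some e.2.2 else none)) (fun x => x) with
    | some m => PySem.List.pyGetD pvLabels m ""
    | none => "low") := by
  have hem : ((((PySem.Dict.empty.insert "error_message" em).insert "filename" fn)).getD "error_message" "") = em := by simp [PySem.Dict.getD_insert]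
  have hfn : ((((PySem.Dict.empty.insert "error_message" em).insert "filename" fn)).getD "filename" "") = fn := by simp
  have hmem : ∀ r : Int, r ∈ (pvSeverity.filterMap
      (fun e => if PySem.Str.isIn e.1 ((((PySem.Dict.empty.insert "error_message" em).insert "filename" fn).getD e.2.1 "")) then some e.2.2 else none)) ↔
      ((PySem.Str.isIn "modulenotfounderror" em = true ∧ (0 : Int) = r) ∨ (PySem.Str.isIn "importerror" em = true ∧ (0 : Int) = r) ∨ (PySem.Str.isIn "syntaxerror" em = true ∧ (0 : Int) = r) ∨ (PySem.Str.isIn "__init__" fn = true ∧ (1 : Int) = r) ∨ (PySem.Str.isIn "setup" fn = true ∧ (1 : Int) = r) ∨ (PySem.Str.isIn "config" fn = true ∧ (1 : Int) = r) ∨ (PySem.Str.isIn "core" fn = true ∧ (1 : Int) = r) ∨ (PySem.Str.isIn "permission" em = true ∧ (2 : Int) = r) ∨ (PySem.Str.isIn "access" em = true ∧ (2 : Int) = r) ∨ (PySem.Str.isIn "security" em = true ∧ (2 : Int) = r) ∨ (PySem.Str.isIn "integrity" em = true ∧ (2 : Int) = r) ∨ (PySem.Str.isIn "timeout" em = true ∧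 (3 : Int) = r) ∨ (PySem.Str.isIn "memory" em = true ∧ (3 : Int) = r) ∨ (PySem.Str.isIn "performance" em = true ∧ (3 : Int) = r) ∨ (PySem.Str.isIn "assertionerror" em = true ∧ (4 : Int) = r) ∨ (PySem.Str.isIn "valueerror" em = true ∧ (4 : Int) = r) ∨ (PySem.Str.isIn "typeerror" em = true ∧ (4 : Int) = r)) := by
    intro r; simp [pvSeverity, List.mem_filterMap, hem, hfn]
  by_cases h0 : (["modulenotfounderror", "importerror", "syntaxerror"].any (fun pattern => PySem.Str.isIn pattern em)) = true
  · rw [if_pos h0]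
    simp only [List.any_cons, List.any_nil, Bool.or_eq_true, Bool.false_eq_true, or_false] at h0
    rw [pv_min_eq (m := (0 : Int)) ?_ ?_]
    · decide
    · rw [hmem]
      rcases h0 with h|h|h
      · exact Or.inl ⟨h, rfl⟩
      · exact Or.inr (Or.inl ⟨h, rfl⟩)
      · exact Or.inr (Or.inr (Or.inl ⟨h, rfl⟩))
    · intro y hy
      rw [hmem] at hy
      rcases hy with ⟨hp, rfl⟩|⟨hp, rfl⟩|⟨hp, rfl⟩|⟨hp, rfl⟩|⟨hp, rfl⟩|⟨hp, rfl⟩|⟨hp, rfl⟩|⟨hp, rfl⟩|⟨hp, rfl⟩|⟨hp, rfl⟩|⟨hp, rfl⟩|⟨hp, rfl⟩|⟨hp, rfl⟩|⟨hp, rfl⟩|⟨hp, rfl⟩|⟨hp, rfl⟩|⟨hp, rfl⟩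
      · omega
      · omega
      · omega
      · omega
      · omega
      · omega
      · omega
      · omega
      · omega
      · omega
      · omega
      · omega
      · omega
      · omega
      · omega
      · omega
      · omega
  rw [if_neg h0]
  simp only [List.any_cons, List.any_nil, Bool.or_eq_true, Bool.false_eq_true, or_false] at h0
  push Not at h0
  by_cases h1 : (["__init__", "setup", "config", "core"].any (fun pattern => PySem.Str.isIn pattern fn)) = true
  · rw [if_pos h1]
    simp only [List.any_cons, List.any_nil, Bool.or_eq_true, Bool.false_eq_true, or_false] at h1
    rw [pv_min_eq (m := (1 : Int)) ?_ ?_]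
    · decide
    · rw [hmem]
      rcases h1 with h|h|h|h
      · exact Or.inr (Or.inr (Or.inr (Or.inl ⟨h, rfl⟩)))
      · exact Or.inr (Or.inr (Or.inr (Or.inr (Or.inl ⟨h, rfl⟩))))
      · exact Or.inr (Or.inr (Or.inr (Or.inr (Or.inr (Or.inl ⟨h, rfl⟩)))))
      · exact Or.inr (Or.inr (Or.inr (Or.inr (Or.inr (Or.inr (Or.inl ⟨h, rfl⟩))))))
    · intro y hy
      rw [hmem] at hy
      rcases hy with ⟨hp, rfl⟩|⟨hp, rfl⟩|⟨hp, rfl⟩|⟨hp, rfl⟩|⟨hp, rfl⟩|⟨hp, rfl⟩|⟨hp, rfl⟩|⟨hp, rfl⟩|⟨hp, rfl⟩|⟨hp, rfl⟩|⟨hp, rfl⟩|⟨hp, rfl⟩|⟨hp, rfl⟩|⟨hp, rfl⟩|⟨hp, rfl⟩|⟨hp, rfl⟩|⟨hp, rfl⟩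
      · exact absurd hp h0.1
      · exact absurd hp h0.2.1
      · exact absurd hp h0.2.2
      · omega
      · omega
      · omega
      · omega
      · omega
      · omega
      · omega
      · omega
      · omega
      · omega
      · omega
      · omega
      · omega
      · omega
  rw [if_neg h1]
  simp only [List.any_cons, List.any_nil, Bool.or_eq_true, Bool.false_eq_true, or_false] at h1
  push Not at h1
  by_cases h2 : (["permission", "access", "security", "integrity"].any (fun pattern => PySem.Str.isIn pattern em)) = true
  · rw [if_pos h2]
    simp only [List.any_cons, List.any_nil, Bool.or_eq_true, Bool.false_eq_true, or_false] at h2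
    rw [pv_min_eq (m := (2 : Int)) ?_ ?_]
    · decide
    · rw [hmem]
      rcases h2 with h|h|h|h
      · exact Or.inr (Or.inr (Or.inr (Or.inr (Or.inr (Or.inr (Or.inr (Or.inl ⟨h, rfl⟩)))))))
      · exact Or.inr (Or.inr (Or.inr (Or.inr (Or.inr (Or.inr (Or.inr (Or.inr (Or.inl ⟨h, rfl⟩))))))))
      · exact Or.inr (Or.inr (Or.inr (Or.inr (Or.inr (Or.inr (Or.inr (Or.inr (Or.inr (Or.inl ⟨h, rfl⟩)))))))))
      · exact Or.inr (Or.inr (Or.inr (Or.inr (Or.inr (Or.inr (Or.inr (Or.inr (Or.inr (Or.inr (Or.inl ⟨h, rfl⟩))))))))))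
    · intro y hy
      rw [hmem] at hy
      rcases hy with ⟨hp, rfl⟩|⟨hp, rfl⟩|⟨hp, rfl⟩|⟨hp, rfl⟩|⟨hp, rfl⟩|⟨hp, rfl⟩|⟨hp, rfl⟩|⟨hp, rfl⟩|⟨hp, rfl⟩|⟨hp, rfl⟩|⟨hp, rfl⟩|⟨hp, rfl⟩|⟨hp, rfl⟩|⟨hp, rfl⟩|⟨hp, rfl⟩|⟨hp, rfl⟩|⟨hp, rfl⟩
      · exact absurd hp h0.1
      · exact absurd hp h0.2.1
      · exact absurd hp h0.2.2
      · exact absurd hp h1.1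
      · exact absurd hp h1.2.1
      · exact absurd hp h1.2.2.1
      · exact absurd hp h1.2.2.2
      · omega
      · omega
      · omega
      · omega
      · omega
      · omega
      · omega
      · omega
      · omega
      · omega
  rw [if_neg h2]
  simp only [List.any_cons, List.any_nil, Bool.or_eq_true, Bool.false_eq_true, or_false] at h2
  push Not at h2
  by_cases h3 : (["timeout", "memory", "performance"].any (fun pattern => PySem.Str.isIn pattern em)) = true
  · rw [if_pos h3]
    simp only [List.any_cons, List.any_nil, Bool.or_eq_true, Bool.false_eq_true, or_false] at h3
    rw [pv_min_eq (m := (3 : Int)) ?_ ?_]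
    · decide
    · rw [hmem]
      rcases h3 with h|h|h
      · exact Or.inr (Or.inr (Or.inr (Or.inr (Or.inr (Or.inr (Or.inr (Or.inr (Or.inr (Or.inr (Or.inr (Or.inl ⟨h, rfl⟩)))))))))))
      · exact Or.inr (Or.inr (Or.inr (Or.inr (Or.inr (Or.inr (Or.inr (Or.inr (Or.inr (Or.inr (Or.inr (Or.inr (Or.inl ⟨h, rfl⟩))))))))))))
      · exact Or.inr (Or.inr (Or.inr (Or.inr (Or.inr (Or.inr (Or.inr (Or.inr (Or.inr (Or.inr (Or.inr (Or.inr (Or.inr (Or.inl ⟨h, rfl⟩)))))))))))))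
    · intro y hy
      rw [hmem] at hy
      rcases hy with ⟨hp, rfl⟩|⟨hp, rfl⟩|⟨hp, rfl⟩|⟨hp, rfl⟩|⟨hp, rfl⟩|⟨hp, rfl⟩|⟨hp, rfl⟩|⟨hp, rfl⟩|⟨hp, rfl⟩|⟨hp, rfl⟩|⟨hp, rfl⟩|⟨hp, rfl⟩|⟨hp, rfl⟩|⟨hp, rfl⟩|⟨hp, rfl⟩|⟨hp, rfl⟩|⟨hp, rfl⟩
      · exact absurd hp h0.1
      · exact absurd hp h0.2.1
      · exact absurd hp h0.2.2
      · exact absurd hp h1.1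
      · exact absurd hp h1.2.1
      · exact absurd hp h1.2.2.1
      · exact absurd hp h1.2.2.2
      · exact absurd hp h2.1
      · exact absurd hp h2.2.1
      · exact absurd hp h2.2.2.1
      · exact absurd hp h2.2.2.2
      · omega
      · omega
      · omega
      · omega
      · omega
      · omega
  rw [if_neg h3]
  simp only [List.any_cons, List.any_nil, Bool.or_eq_true, Bool.false_eq_true, or_false] at h3
  push Not at h3
  by_cases h4 : (["assertionerror", "valueerror", "typeerror"].any (fun pattern => PySem.Str.isIn pattern em)) = true
  · rw [if_pos h4]
    simp only [List.any_cons, List.any_nil, Bool.or_eq_true, Bool.false_eq_true, or_false] at h4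
    rw [pv_min_eq (m := (4 : Int)) ?_ ?_]
    · decide
    · rw [hmem]
      rcases h4 with h|h|h
      · exact Or.inr (Or.inr (Or.inr (Or.inr (Or.inr (Or.inr (Or.inr (Or.inr (Or.inr (Or.inr (Or.inr (Or.inr (Or.inr (Or.inr (Or.inl ⟨h, rfl⟩))))))))))))))
      · exact Or.inr (Or.inr (Or.inr (Or.inr (Or.inr (Or.inr (Or.inr (Or.inr (Or.inr (Or.inr (Or.inr (Or.inr (Or.inr (Or.inr (Or.inr (Or.inl ⟨h, rfl⟩)))))))))))))))
      · exact Or.inr (Or.inr (Or.inr (Or.inr (Or.inr (Or.inr (Or.inr (Or.inr (Or.inr (Or.inr (Or.inr (Or.inr (Or.inr (Or.inr (Or.inr (Or.inr (⟨h, rfl⟩))))))))))))))))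
    · intro y hy
      rw [hmem] at hy
      rcases hy with ⟨hp, rfl⟩|⟨hp, rfl⟩|⟨hp, rfl⟩|⟨hp, rfl⟩|⟨hp, rfl⟩|⟨hp, rfl⟩|⟨hp, rfl⟩|⟨hp, rfl⟩|⟨hp, rfl⟩|⟨hp, rfl⟩|⟨hp, rfl⟩|⟨hp, rfl⟩|⟨hp, rfl⟩|⟨hp, rfl⟩|⟨hp, rfl⟩|⟨hp, rfl⟩|⟨hp, rfl⟩
      · exact absurd hp h0.1
      · exact absurd hp h0.2.1
      · exact absurd hp h0.2.2
      · exact absurd hp h1.1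
      · exact absurd hp h1.2.1
      · exact absurd hp h1.2.2.1
      · exact absurd hp h1.2.2.2
      · exact absurd hp h2.1
      · exact absurd hp h2.2.1
      · exact absurd hp h2.2.2.1
      · exact absurd hp h2.2.2.2
      · exact absurd hp h3.1
      · exact absurd hp h3.2.1
      · exact absurd hp h3.2.2
      · omega
      · omega
      · omega
  rw [if_neg h4]
  simp only [List.any_cons, List.any_nil, Bool.or_eq_true, Bool.false_eq_true, or_false] at h4
  push Not at h4
  have hnil : (pvSeverity.filterMap
      (fun e => if PySem.Str.isIn e.1 ((((PySem.Dict.empty.insert "error_message" em).insert "filename" fn).getD e.2.1 "")) then some e.2.2 else none)) = [] := by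
    rw [List.eq_nil_iff_forall_not_mem]
    intro r hr; rw [hmem] at hr
    rcases hr with ⟨hp, _⟩|⟨hp, _⟩|⟨hp, _⟩|⟨hp, _⟩|⟨hp, _⟩|⟨hp, _⟩|⟨hp, _⟩|⟨hp, _⟩|⟨hp, _⟩|⟨hp, _⟩|⟨hp, _⟩|⟨hp, _⟩|⟨hp, _⟩|⟨hp, _⟩|⟨hp, _⟩|⟨hp, _⟩|⟨hp, _⟩
    · exact absurd hp h0.1
    · exact absurd hp h0.2.1
    · exact absurd hp h0.2.2
    · exact absurd hp h1.1
    · exact absurd hp h1.2.1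
    · exact absurd hp h1.2.2.1
    · exact absurd hp h1.2.2.2
    · exact absurd hp h2.1
    · exact absurd hp h2.2.1
    · exact absurd hp h2.2.2.1
    · exact absurd hp h2.2.2.2
    · exact absurd hp h3.1
    · exact absurd hp h3.2.1
    · exact absurd hp h3.2.2
    · exact absurd hp h4.1
    · exact absurd hp h4.2.1
    · exact absurd hp h4.2.2
  rw [hnil]
  rfl

-- ===== VERDICT (by name: the statement is the Claim_ definition above) =====
theorem assess_criticality_py_spec : Claim_equal_assess_criticality_py := by
  intro failure _
  unfold Spec_assess_criticality_py assess_criticality_py assess_criticality_py_alt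
  exact pv_core _ _
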